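-- pv_equiv track=rewrite | github.com/MelancholySeal/HomeWork | heyhumanity/22.py | f
-- ===== SOURCE A (Python) =====
-- def f(x):
--     m=0
--     s=0
--     while x > 0:
--         d=x%6
--         s += d
--         if d > m: m = d
--         x = x // 6
--     return m,s
-- ===== SOURCE B (Python) =====
-- def f(x):
--     if x <= 0:
--         return (0, 0)
--     m, s = f(x // 6)
--     d = x % 6
--     return (max(m, d), s + d)
-- ===== Notes on version B (the rewrite author's own statement) =====
-- stated objective: alternative
-- what changed: Replaces A's iterative while-loop with running max/sum accumulators by a structural recursion on the quotient that combines each digit with the recursive result via max and +.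
import Mathlib
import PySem

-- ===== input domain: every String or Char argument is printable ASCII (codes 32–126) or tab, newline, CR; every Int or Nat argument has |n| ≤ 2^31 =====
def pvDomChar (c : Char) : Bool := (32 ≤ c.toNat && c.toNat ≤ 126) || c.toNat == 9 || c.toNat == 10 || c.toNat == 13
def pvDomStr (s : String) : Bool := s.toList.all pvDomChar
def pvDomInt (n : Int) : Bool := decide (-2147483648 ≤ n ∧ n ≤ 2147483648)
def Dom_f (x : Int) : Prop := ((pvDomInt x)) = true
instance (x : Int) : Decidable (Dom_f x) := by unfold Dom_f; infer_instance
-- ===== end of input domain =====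

-- B replaces A's iterative while-loop with accumulators by a structural recursion on the quotient (alternative decomposition, same cost).


-- termination helper: for x > 0, x // 6 is strictly smaller (as a Nat measure)
theorem pvFloordiv6_toNat_lt (x : Int) (hx : 0 < x) :
    (PySem.Int.floordiv x 6).toNat < x.toNat := by
  rw [PySem.Int.floordiv_eq_ediv_of_pos (by omega)]
  have h1 : x / 6 < x := by omega
  have h2 : 0 ≤ x / 6 := by positivity
  omega

-- ===== PORT A =====
-- the while loop of A, state (x, m, s)
def fLoop (x m s : Int) : Int × Int :=
  if h : x > 0 then
    let d := PySem.Int.mod x 6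
    fLoop (PySem.Int.floordiv x 6) (if d > m then d else m) (s + d)
  else (m, s)
termination_by x.toNat
decreasing_by exact pvFloordiv6_toNat_lt x h

def f (x : Int) : Int × Int := fLoop x 0 0

-- ===== PORT B =====
def f_alt (x : Int) : Int × Int :=
  if h : x ≤ 0 then (0, 0)
  else
    let ms := f_alt (PySem.Int.floordiv x 6)
    let d := PySem.Int.mod x 6
    (max ms.1 d, ms.2 + d)
termination_by x.toNat
decreasing_by exact pvFloordiv6_toNat_lt x (by omega)

-- ===== PRECONDITION & SPEC =====
def Spec_f (x : Int) (out : Int × Int) : Prop := out = f_alt x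
instance (x : Int) (out : Int × Int) : Decidable (Spec_f x out) := by unfold Spec_f; infer_instance

-- ===== CLAIM (what is proved, stated in full; the proofs are below) =====
def Claim_equal_f : Prop := ∀ (x : Int), Dom_f x → Spec_f x (f x)

-- ===== LEMMAS AND PROOFS =====

theorem fLoop_eq (n : Nat) : ∀ (x m s : Int), x.toNat ≤ n → 0 ≤ m →
    fLoop x m s = (max m (f_alt x).1, s + (f_alt x).2) := by
  induction n with
  | zero =>
    intro x m s hn hm
    rw [fLoop, f_alt]
    have hx : ¬ x > 0 := by omega
    simp [hx, show x ≤ 0 by omega]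
    omega
  | succ n ih =>
    intro x m s hn hm
    rw [fLoop, f_alt]
    by_cases hx : x > 0
    · have hd : 0 ≤ PySem.Int.mod x 6 := by
        rw [PySem.Int.mod_eq_emod_of_pos (by omega)]
        exact Int.emod_nonneg x (by norm_num)
      have hlt := pvFloordiv6_toNat_lt x hx
      simp only [hx, dite_true, show ¬ x ≤ 0 by omega, dite_false]
      rw [ih _ _ _ (by omega) (by split_ifs <;> omega)]
      simp only [Prod.mk.injEq]
      refine ⟨by split_ifs <;> omega, by ring⟩
    · simp [hx, show x ≤ 0 by omega]
      omega

-- ===== VERDICT (by name: the statement is the Claim_ definition above) =====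
theorem f_spec : Claim_equal_f := by
  intro x _
  unfold Spec_f f
  rw [fLoop_eq x.toNat x 0 0 le_rfl le_rfl]
  have h1 : 0 ≤ (f_alt x).1 := by
    rw [f_alt]
    split_ifs with h
    · simp
    · have : 0 ≤ PySem.Int.mod x 6 := by
        rw [PySem.Int.mod_eq_emod_of_pos (by omega)]
        exact Int.emod_nonneg x (by norm_num)
      simp; omega
  simp [max_eq_right h1]
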